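-- pv_equiv track=rewrite | github.com/MikeLaptev/sandbox_python | leetcode/medium/string/maximum_score_from_removing_substrings.py | process_opt
-- ===== SOURCE A (Python) =====
-- def process_opt(s: str, a: str, b: str, x: int, y: int) -> int:
--     c1 = c2 = ans = 0
--     s += "c"
--     for c in s:
--         if c == a:
--             c1 += 1
--         elif c == b:
--             if c1 == 0:
--                 c2 += 1
--             else:
--                 ans += x
--                 c1 -= 1
--         else:
--             ans += y * min(c1, c2)
--             c1 = c2 = 0
--     return ans
-- ===== SOURCE B (Python) =====
-- def process_opt(s: str, a: str, b: str, x: int, y: int) -> int: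
--     # Stack-based matching instead of counters: pass 1 removes "ab" pairs (+x),
--     # pass 2 removes "ba" pairs (+y); non-matching chars act as barriers.
--     def tok(ch):
--         if ch == a:
--             return 0      # 'a' token (same priority as A: a checked first)
--         if ch == b:
--             return 1      # 'b' token
--         return 2          # barrier
--
--     total = 0
--     stack = []
--     for ch in s:
--         t = tok(ch)
--         if t == 1 and stack and stack[-1] == 0:
--             stack.pop()
--             total += x
--         else:
--             stack.append(t)
--     rest = []
--     for t in stack:
--         if t == 0 and rest and rest[-1] == 1:
--             rest.pop()
--             total += y
--         else:
--             rest.append(t)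
--     return total
-- ===== Notes on version B (the rewrite author's own statement) =====
-- stated objective: idiomatic
-- what changed: Replaces A's counter bookkeeping over s with a sentinel 'c' appended by the classic two-pass stack matching over s alone: pass 1 pops 'ab' pairs for x, pass 2 pops 'ba' pairs from the leftover stack for y, with non-letter tokens as barriers.
-- intended difference: When a = "c" or b = "c", A's appended sentinel character collides with a pattern letter, so A skips the final segment's y-flush (and for b = "c" may add a spurious x) and returns a wrong score, while B returns the intended greedy matching score; D_ is exactly the inputs where the two values differ. — e.g. on process_opt("bc", "c", "b", 0, 5): A returns 0, B returns 5
import Mathlib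
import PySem

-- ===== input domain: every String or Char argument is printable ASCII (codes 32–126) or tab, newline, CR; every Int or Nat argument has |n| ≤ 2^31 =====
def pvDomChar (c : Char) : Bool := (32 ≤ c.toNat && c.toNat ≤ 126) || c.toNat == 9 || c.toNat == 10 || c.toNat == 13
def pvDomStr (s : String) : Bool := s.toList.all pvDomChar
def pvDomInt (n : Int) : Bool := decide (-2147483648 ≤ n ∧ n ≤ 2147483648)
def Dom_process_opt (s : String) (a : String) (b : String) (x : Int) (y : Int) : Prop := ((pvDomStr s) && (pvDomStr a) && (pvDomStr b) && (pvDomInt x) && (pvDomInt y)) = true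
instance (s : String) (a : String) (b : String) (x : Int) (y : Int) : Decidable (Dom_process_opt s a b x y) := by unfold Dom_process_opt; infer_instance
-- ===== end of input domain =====

-- B replaces A's counter loop (over s with an appended sentinel "c") by the classic two-pass
-- stack matching over s alone; alternative structure, not claimed faster.

-- ===== PORT A =====
-- one iteration of A's loop body, statement for statement (Python's `c == a`
-- compares the 1-character string to a)
def pvAStep (a b : String) (x y : Int) (st : Int × Int × Int) (c : Char) : Int × Int × Int :=
  let c1 : Int := st.1
  let c2 : Int := st.2.1
  let ans : Int := st.2.2
  let cs : String := String.ofList [c]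
  if cs = a then
    let c1 : Int := c1 + 1
    (c1, c2, ans)
  else if cs = b then
    if c1 = 0 then
      let c2 : Int := c2 + 1
      (c1, c2, ans)
    else
      let ans : Int := ans + x
      let c1 : Int := c1 - 1
      (c1, c2, ans)
  else
    let ans : Int := ans + y * (min c1 c2)
    let c1 : Int := 0
    let c2 : Int := 0
    (c1, c2, ans)

def process_opt (s : String) (a : String) (b : String) (x : Int) (y : Int) : Int :=
  let c1 : Int := 0
  let c2 : Int := 0
  let ans : Int := 0
  let s : String := s ++ "c"
  let st : Int × Int × Int := s.toList.foldl (pvAStep a b x y) (c1, c2, ans)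
  let ans : Int := st.2.2
  ans

-- ===== PORT B =====
inductive PvTok where
  | ta | tb | tO
deriving DecidableEq, Repr

-- Source B's tok(): classify a char, a takes priority over b, anything else is a barrier
def pvTok (a b : String) (c : Char) : PvTok :=
  if String.ofList [c] = a then .ta else if String.ofList [c] = b then .tb else .tO

-- Source B's first pass: stack held head-first (head = Python's stack[-1])
def pvPass1 (a b : String) (x : Int) (st : List PvTok × Int) (c : Char) : List PvTok × Int :=
  match pvTok a b c with
  | .tb => match st.1 with
           | .ta :: rest => (rest, st.2 + x)
           | _ => (.tb :: st.1, st.2)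
  | τ => (τ :: st.1, st.2)

-- Source B's second pass over the leftover stack (bottom to top = reverse of head-first list)
def pvPass2 (y : Int) (st : List PvTok × Int) (τ : PvTok) : List PvTok × Int :=
  match τ with
  | .ta => match st.1 with
           | .tb :: rest => (rest, st.2 + y)
           | _ => (.ta :: st.1, st.2)
  | τ' => (τ' :: st.1, st.2)

def process_opt_alt (s : String) (a : String) (b : String) (x : Int) (y : Int) : Int :=
  let p := s.toList.foldl (pvPass1 a b x) ([], 0)
  (p.1.reverse.foldl (pvPass2 y) ([], p.2)).2

-- ===== PRECONDITION & SPEC =====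
-- When a = "c" or b = "c" the sentinel character A appends collides with a pattern letter, so A
-- skips the final segment's y-flush (and for b = "c" may add a spurious x) and returns a wrong
-- score, while B returns the intended greedy score; D_ is exactly the inputs where the values
-- differ.  Inside D_ below: t is the final all-pattern-letter run of s (reversed), the first fold
-- is the number of a-letters left unpaired in that run, the second the number of b-letters.
def D_process_opt (s : String) (a : String) (b : String) (x : Int) (y : Int) : Prop :=
  let w := (s.toList.reverse.takeWhile fun c => [c] == a.toList || [c] == b.toList).foldr
    (fun c p => let q := p.1 - if [c] == a.toList then 1 else -1; (q, max p.2 q)) (0, 0)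
  let m := y * min (w.2 - w.1) w.2
  if a = "c" then m ≠ 0 else b = "c" ∧ (if 0 < w.2 - w.1 then x else 0) ≠ m

instance (s : String) (a : String) (b : String) (x : Int) (y : Int) : Decidable (D_process_opt s a b x y) := by
  unfold D_process_opt; infer_instance

def Spec_process_opt (s : String) (a : String) (b : String) (x : Int) (y : Int) (out : Int) : Prop :=
  ¬ D_process_opt s a b x y → out = process_opt_alt s a b x y
instance (s : String) (a : String) (b : String) (x : Int) (y : Int) (out : Int) : Decidable (Spec_process_opt s a b x y out) := by unfold Spec_process_opt; infer_instance

def pvDiffWitness_process_opt : String × String × String × Int × Int := ("bc", "c", "b", 0, 5)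
def pvDiffWitnessOut_process_opt : Int × Int := (0, 5)

-- ===== CLAIM (what is proved, stated in full; the proofs are below) =====
def Claim_unchanged_process_opt : Prop := ∀ (s : String) (a : String) (b : String) (x : Int) (y : Int), Dom_process_opt s a b x y → Spec_process_opt s a b x y (process_opt s a b x y)
def Claim_changed_process_opt : Prop := Dom_process_opt (pvDiffWitness_process_opt.1) (pvDiffWitness_process_opt.2.1) (pvDiffWitness_process_opt.2.2.1) (pvDiffWitness_process_opt.2.2.2.1) (pvDiffWitness_process_opt.2.2.2.2) ∧ D_process_opt (pvDiffWitness_process_opt.1) (pvDiffWitness_process_opt.2.1) (pvDiffWitness_process_opt.2.2.1) (pvDiffWitness_process_opt.2.2.2.1) (pvDiffWitness_process_opt.2.2.2.2) ∧ process_opt (pvDiffWitness_process_opt.1) (pvDiffWitness_process_opt.2.1) (pvDiffWitness_process_opt.2.2.1) (pvDiffWitness_process_opt.2.2.2.1) (pvDiffWitness_process_opt.2.2.2.2) = pvDiffWitnessOut_process_opt.1 ∧ process_opt_alt (pvDiffWitness_process_opt.1) (pvDiffWitness_process_opt.2.1) (pvDiffWitness_process_opt.2.2.1) (pvDiffWitness_process_opt.2.2.2.1)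 (pvDiffWitness_process_opt.2.2.2.2) = pvDiffWitnessOut_process_opt.2 ∧ pvDiffWitnessOut_process_opt.1 ≠ pvDiffWitnessOut_process_opt.2
def Claim_exact_process_opt : Prop := ∀ (s : String) (a : String) (b : String) (x : Int) (y : Int), Dom_process_opt s a b x y → D_process_opt s a b x y → process_opt s a b x y ≠ process_opt_alt s a b x y

-- ===== LEMMAS AND PROOFS =====

-- token-level final segment and excess statistics (proof-side)
def pvSegT (τs : List PvTok) : List PvTok := (τs.reverse.takeWhile (fun τ => τ ≠ PvTok.tO)).reverse

def pvExcStep (p : Int × Int) (τ : PvTok) : Int × Int :=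
  (p.1 + (if τ = PvTok.tb then 1 else -1), max p.2 (p.1 + (if τ = PvTok.tb then 1 else -1)))

-- proof-side names for the quantities D_ computes inline
def pvT (s a b : String) : List Char :=
  s.toList.reverse.takeWhile fun c => [c] == a.toList || [c] == b.toList

def pvW (s a b : String) : Int × Int :=
  (pvT s a b).foldr (fun c p => let q := p.1 - if [c] == a.toList then 1 else -1; (q, max p.2 q)) (0, 0)

def pvC1 (s a b : String) : Int := (pvW s a b).2 - (pvW s a b).1

def pvC2 (s a b : String) : Int := (pvW s a b).2

-- token-level versions of the two loop bodies
def pvTStepA (x y : Int) (st : Int × Int × Int) (τ : PvTok) : Int × Int × Int :=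
  match τ with
  | .ta => (st.1 + 1, st.2.1, st.2.2)
  | .tb => (if st.1 = 0 then (st.1, st.2.1 + 1, st.2.2) else (st.1 - 1, st.2.1, st.2.2 + x))
  | .tO => (0, 0, st.2.2 + y * min st.1 st.2.1)

def pvTStep1 (x : Int) (st : List PvTok × Int) (τ : PvTok) : List PvTok × Int :=
  match τ with
  | .tb => match st.1 with
           | .ta :: rest => (rest, st.2 + x)
           | _ => (.tb :: st.1, st.2)
  | τ' => (τ' :: st.1, st.2)

theorem pvAStep_tok (a b : String) (x y : Int) (st : Int × Int × Int) (c : Char) :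
    pvAStep a b x y st c = pvTStepA x y st (pvTok a b c) := by
  simp only [pvAStep, pvTok, pvTStepA]
  split_ifs <;> rfl

theorem pvPass1_tok (a b : String) (x : Int) (st : List PvTok × Int) (c : Char) :
    pvPass1 a b x st c = pvTStep1 x st (pvTok a b c) := by
  unfold pvPass1 pvTStep1
  rfl

theorem pvFoldA_tok (a b : String) (x y : Int) (cs : List Char) (st : Int × Int × Int) :
    cs.foldl (pvAStep a b x y) st = (cs.map (pvTok a b)).foldl (pvTStepA x y) st := by
  rw [List.foldl_map]
  have h : (fun st c => pvTStepA x y st (pvTok a b c)) = pvAStep a b x y := by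
    funext st c; rw [pvAStep_tok]
  rw [h]

theorem pvFold1_tok (a b : String) (x : Int) (cs : List Char) (st : List PvTok × Int) :
    cs.foldl (pvPass1 a b x) st = (cs.map (pvTok a b)).foldl (pvTStep1 x) st := by
  rw [List.foldl_map]
  have h : (fun st c => pvTStep1 x st (pvTok a b c)) = pvPass1 a b x := by
    funext st c; rw [pvPass1_tok]
  rw [h]

-- pass-2 facts -------------------------------------------------------------

theorem pvRepl_shift (a : PvTok) (n : Nat) (r : List PvTok) :
    List.replicate n a ++ a :: r = a :: (List.replicate n a ++ r) := by
  induction n with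
  | zero => simp
  | succ n ih => simp [List.replicate_succ, ih]

theorem pvPass2_to (y : Int) (st : List PvTok × Int) : pvPass2 y st PvTok.tO = (PvTok.tO :: st.1, st.2) := rfl
theorem pvPass2_tb (y : Int) (st : List PvTok × Int) : pvPass2 y st PvTok.tb = (PvTok.tb :: st.1, st.2) := rfl

-- one pass-2 step splits off the starting total
theorem pvPass2_step_shift (y : Int) (r : List PvTok) (t : Int) (τ : PvTok) :
    pvPass2 y (r, t) τ = ((pvPass2 y (r, 0) τ).1, t + (pvPass2 y (r, 0) τ).2) := by
  cases τ with
  | ta =>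
      cases r with
      | nil => simp [pvPass2]
      | cons h r' => cases h <;> simp [pvPass2]
  | tb => simp [pvPass2]
  | tO => simp [pvPass2]

-- the whole pass-2 fold splits off the starting total
theorem pvPass2_shift (y : Int) (w : List PvTok) : ∀ (r : List PvTok) (t : Int),
    (w.foldl (pvPass2 y) (r, t)).1 = (w.foldl (pvPass2 y) (r, 0)).1 ∧
    (w.foldl (pvPass2 y) (r, t)).2 = t + (w.foldl (pvPass2 y) (r, 0)).2 := by
  induction w with
  | nil => intro r t; simp
  | cons τ w ih =>
      intro r t
      simp only [List.foldl_cons]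
      rw [pvPass2_step_shift y r t τ]
      obtain ⟨h1, h2⟩ := ih (pvPass2 y (r, 0) τ).1 (t + (pvPass2 y (r, 0) τ).2)
      obtain ⟨h1', h2'⟩ := ih (pvPass2 y (r, 0) τ).1 ((pvPass2 y (r, 0) τ).2)
      have g1 : (w.foldl (pvPass2 y) (pvPass2 y (r, 0) τ)).1 = (w.foldl (pvPass2 y) ((pvPass2 y (r, 0) τ).1, 0)).1 := h1'
      have g2 : (w.foldl (pvPass2 y) (pvPass2 y (r, 0) τ)).2 = (pvPass2 y (r, 0) τ).2 + (w.foldl (pvPass2 y) ((pvPass2 y (r, 0) τ).1, 0)).2 := h2'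
      constructor
      · rw [h1, g1]
      · rw [h2, g2]; ring

-- b-tokens are always pushed by pass 2
theorem pvPass2_repl_tb (y : Int) (n : Nat) : ∀ (r : List PvTok) (t : Int),
    (List.replicate n PvTok.tb).foldl (pvPass2 y) (r, t) = (List.replicate n PvTok.tb ++ r, t) := by
  induction n with
  | zero => intro r t; simp
  | succ n ih =>
      intro r t
      rw [List.replicate_succ, List.foldl_cons, pvPass2_tb]
      rw [ih (PvTok.tb :: r) t, pvRepl_shift]
      simp

-- a-tokens are pushed by pass 2 when the top is not a b-token
theorem pvPass2_repl_ta (y : Int) (n : Nat) : ∀ (r : List PvTok) (t : Int),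
    r.head? ≠ some PvTok.tb →
    (List.replicate n PvTok.ta).foldl (pvPass2 y) (r, t) = (List.replicate n PvTok.ta ++ r, t) := by
  induction n with
  | zero => intro r t _; simp
  | succ n ih =>
      intro r t hr
      rw [List.replicate_succ, List.foldl_cons]
      have hstep : pvPass2 y (r, t) PvTok.ta = (PvTok.ta :: r, t) := by
        cases r with
        | nil => rfl
        | cons h r' =>
            cases h with
            | ta => rfl
            | tb => simp at hr
            | tO => rfl
      rw [hstep, ih (PvTok.ta :: r) t (by simp), pvRepl_shift]
      simp

-- pass 2 over b^n2 then a^n1 scores y * min n1 n2 (barrier or empty below)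
theorem pvPass2_pop (y : Int) (n1 : Nat) : ∀ (n2 : Nat) (r : List PvTok) (t : Int),
    r.head? ≠ some PvTok.tb →
    ((List.replicate n1 PvTok.ta).foldl (pvPass2 y) (List.replicate n2 PvTok.tb ++ r, t)).2
      = t + y * min (n1 : Int) (n2 : Int) := by
  induction n1 with
  | zero => intro n2 r t _; simp
  | succ n1 ih =>
      intro n2 r t hr
      cases n2 with
      | zero =>
          simp only [List.replicate_zero, List.nil_append]
          rw [List.replicate_succ, List.foldl_cons]
          have hstep : pvPass2 y (r, t) PvTok.ta = (PvTok.ta :: r, t) := by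
            cases r with
            | nil => rfl
            | cons h r' =>
                cases h with
                | ta => rfl
                | tb => simp at hr
                | tO => rfl
          rw [hstep, pvPass2_repl_ta y n1 (PvTok.ta :: r) t (by simp)]
          simp
          omega
      | succ n2 =>
          rw [List.replicate_succ, List.replicate_succ, List.foldl_cons]
          have hstep : pvPass2 y (PvTok.tb :: List.replicate n2 PvTok.tb ++ r, t) PvTok.ta
              = (List.replicate n2 PvTok.tb ++ r, t + y) := rfl
          rw [hstep, ih n2 r (t + y) hr]
          have hmin : min ((n1 : Int) + 1) ((n2 : Int) + 1) = min (n1 : Int) (n2 : Int) + 1 := by omega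
          push_cast
          rw [hmin]
          ring

-- full pass-2 score over a leftover stack u.reverse ++ b^n2 ++ a^n1
theorem pvPass2_full (y : Int) (u : List PvTok) (n1 n2 : Nat) (t : Int)
    (hu : u = [] ∨ u.head? = some PvTok.tO) :
    ((u.reverse ++ (List.replicate n2 PvTok.tb ++ List.replicate n1 PvTok.ta)).foldl (pvPass2 y) ([], t)).2
      = (u.reverse.foldl (pvPass2 y) ([], t)).2 + y * min (n1 : Int) (n2 : Int) := by
  rw [List.foldl_append]
  set q := u.reverse.foldl (pvPass2 y) ([], t) with hq
  have hhead : q.1.head? ≠ some PvTok.tb := by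
    rcases hu with h | h
    · subst h; simp [hq]
    · rcases u with _ | ⟨h0, u'⟩
      · simp at h
      · simp only [List.head?_cons, Option.some.injEq] at h
        subst h
        rw [hq, List.reverse_cons, List.foldl_append]
        simp [pvPass2_to]
  rw [List.foldl_append, pvPass2_repl_tb y n2 q.1 q.2]
  rw [pvPass2_pop y n1 n2 q.1 q.2 hhead]

-- score of pass 2 run over a stack u (head-first), starting from total 0
def pvGscore (y : Int) (u : List PvTok) : Int := (u.reverse.foldl (pvPass2 y) ([], 0)).2

-- the invariant linking A's counters to B's first-pass stack
def pvInv (y : Int) (p : Int × Int × Int) (q : List PvTok × Int) : Prop :=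
  ∃ (n1 n2 : Nat) (u : List PvTok),
    p.1 = (n1 : Int) ∧ p.2.1 = (n2 : Int) ∧
    q.1 = List.replicate n1 PvTok.ta ++ (List.replicate n2 PvTok.tb ++ u) ∧
    (u = [] ∨ u.head? = some PvTok.tO) ∧
    p.2.2 = q.2 + pvGscore y u

theorem pvInv_step (x y : Int) (τ : PvTok) (p : Int × Int × Int) (q : List PvTok × Int)
    (h : pvInv y p q) : pvInv y (pvTStepA x y p τ) (pvTStep1 x q τ) := by
  obtain ⟨n1, n2, u, h1, h2, h3, h4, h5⟩ := h
  cases τ with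
  | ta =>
      exact ⟨n1 + 1, n2, u, by simp [pvTStepA, h1], by simp [pvTStepA, h2],
        by simp [pvTStep1, h3, List.replicate_succ], h4, by simp [pvTStepA, pvTStep1, h5]⟩
  | tb =>
      cases n1 with
      | zero =>
          have hz : p.1 = 0 := by simp [h1]
          have hpush : pvTStep1 x q PvTok.tb = (PvTok.tb :: q.1, q.2) := by
            unfold pvTStep1
            rcases n2 with _ | n2
            · rcases h4 with h | h
              · subst h; simp at h3; rw [h3]
              · rcases u with _ | ⟨h0, u'⟩
                · simp at h
                · simp only [List.head?_cons, Option.some.injEq] at h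
                  subst h; simp at h3; rw [h3]
            · simp [List.replicate_succ] at h3; rw [h3]
          refine ⟨0, n2 + 1, u, by simp [pvTStepA, hz], by simp [pvTStepA, hz, h2], ?_, h4, ?_⟩
          · rw [hpush]; simp [h3, List.replicate_succ]
          · rw [hpush]; simp [pvTStepA, hz, h5]
      | succ n1 =>
          have hnz : ¬ p.1 = 0 := by rw [h1]; push_cast; omega
          have hpop : pvTStep1 x q PvTok.tb = (List.replicate n1 PvTok.ta ++ (List.replicate n2 PvTok.tb ++ u), q.2 + x) := by
            unfold pvTStep1
            rw [h3, List.replicate_succ, List.cons_append]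
          have hstepA : pvTStepA x y p PvTok.tb = (p.1 - 1, p.2.1, p.2.2 + x) := by
            simp [pvTStepA, hnz]
          refine ⟨n1, n2, u, ?_, by rw [hstepA]; exact h2, by rw [hpop], h4, ?_⟩
          · rw [hstepA]; show p.1 - 1 = _; rw [h1]; push_cast; ring
          · rw [hpop, hstepA]; show p.2.2 + x = _; rw [h5]; ring
  | tO =>
      refine ⟨0, 0, PvTok.tO :: q.1, by simp [pvTStepA], by simp [pvTStepA], by simp [pvTStep1], Or.inr (by simp), ?_⟩
      have hrev : q.1.reverse = u.reverse ++ (List.replicate n2 PvTok.tb ++ List.replicate n1 PvTok.ta) := by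
        rw [h3]; simp [List.reverse_append, List.reverse_replicate, List.append_assoc]
      have hg : pvGscore y (PvTok.tO :: q.1) = pvGscore y u + y * min (n1 : Int) (n2 : Int) := by
        unfold pvGscore
        rw [List.reverse_cons, List.foldl_append, hrev]
        have hlast : ∀ st : List PvTok × Int, (List.foldl (pvPass2 y) st [PvTok.tO]).2 = st.2 := fun st => rfl
        rw [hlast]
        exact pvPass2_full y u n1 n2 0 h4
      simp only [pvTStepA, pvTStep1]
      rw [hg, h5, h1, h2]
      ring

theorem pvInv_fold (x y : Int) (τs : List PvTok) : ∀ (p : Int × Int × Int) (q : List PvTok × Int),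
    pvInv y p q → pvInv y (τs.foldl (pvTStepA x y) p) (τs.foldl (pvTStep1 x) q) := by
  induction τs with
  | nil => intro p q h; exact h
  | cons τ τs ih =>
      intro p q h
      rw [List.foldl_cons, List.foldl_cons]
      exact ih _ _ (pvInv_step x y τ p q h)

-- excess-statistics facts --------------------------------------------------

theorem pvExc_shift (w : List PvTok) : ∀ (c m : Int), c ≤ m →
    w.foldl pvExcStep (c, m)
      = (c + (w.foldl pvExcStep (0, 0)).1, max m (c + (w.foldl pvExcStep (0, 0)).2)) := by
  induction w with
  | nil => intro c m h; simp; omega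
  | cons τ w ih =>
      intro c m h
      rw [List.foldl_cons, List.foldl_cons]
      have hd : pvExcStep (c, m) τ = (c + (if τ = PvTok.tb then 1 else -1), max m (c + (if τ = PvTok.tb then 1 else -1))) := rfl
      have hd0 : pvExcStep (0, 0) τ = ((if τ = PvTok.tb then 1 else -1), max 0 (if τ = PvTok.tb then 1 else -1)) := by
        simp [pvExcStep]
      set d : Int := if τ = PvTok.tb then 1 else -1 with hdd
      rw [hd, hd0]
      rw [ih (c + d) (max m (c + d)) (by omega), ih d (max 0 d) (by omega)]
      simp only [Prod.mk.injEq]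
      constructor <;> omega

theorem pvExc_mx_nonneg (w : List PvTok) : 0 ≤ (w.foldl pvExcStep (0, 0)).2 := by
  cases w with
  | nil => simp
  | cons τ w =>
      rw [List.foldl_cons]
      have hd0 : pvExcStep (0, 0) τ = ((if τ = PvTok.tb then 1 else -1), max 0 (if τ = PvTok.tb then 1 else -1)) := by
        simp [pvExcStep]
      rw [hd0, pvExc_shift w _ _ (by omega)]
      dsimp only
      omega

-- A's counters over a barrier-free segment, from the excess statistics
theorem pvCnt_seg (x y : Int) (seg : List PvTok) : PvTok.tO ∉ seg → ∀ (c1 c2 t : Int), 0 ≤ c1 →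
    (seg.foldl (pvTStepA x y) (c1, c2, t)).1
        = c1 - (seg.foldl pvExcStep (0, 0)).1 + max ((seg.foldl pvExcStep (0, 0)).2 - c1) 0 ∧
    (seg.foldl (pvTStepA x y) (c1, c2, t)).2.1
        = c2 + max ((seg.foldl pvExcStep (0, 0)).2 - c1) 0 := by
  induction seg with
  | nil =>
      intro _ c1 c2 t h1
      simp only [List.foldl_nil]
      constructor <;> omega
  | cons τ seg ih =>
      intro hno c1 c2 t h1
      have hτ : τ ≠ PvTok.tO := by intro h; exact hno (by simp [h])
      have hno' : PvTok.tO ∉ seg := fun h => hno (by simp [h])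
      have hmx := pvExc_mx_nonneg seg
      rw [List.foldl_cons, List.foldl_cons]
      cases τ with
      | tO => exact absurd rfl hτ
      | ta =>
          have hd0 : pvExcStep (0, 0) PvTok.ta = (-1, 0) := by decide
          rw [hd0, pvExc_shift seg (-1) 0 (by omega)]
          have hstep : pvTStepA x y (c1, c2, t) PvTok.ta = (c1 + 1, c2, t) := rfl
          rw [hstep]
          obtain ⟨g1, g2⟩ := ih hno' (c1 + 1) c2 t (by omega)
          rw [g1, g2]
          refine ⟨?_, ?_⟩ <;> dsimp only <;> omega
      | tb =>
          have hd0 : pvExcStep (0, 0) PvTok.tb = (1, 1) := by decide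
          rw [hd0, pvExc_shift seg 1 1 (by omega)]
          by_cases hz : c1 = 0
          · have hstep : pvTStepA x y (c1, c2, t) PvTok.tb = (c1, c2 + 1, t) := by
              simp [pvTStepA, hz]
            rw [hstep]
            obtain ⟨g1, g2⟩ := ih hno' c1 (c2 + 1) t h1
            rw [g1, g2]
            subst hz
            refine ⟨?_, ?_⟩ <;> dsimp only <;> omega
          · have hstep : pvTStepA x y (c1, c2, t) PvTok.tb = (c1 - 1, c2, t + x) := by
              simp [pvTStepA, hz]
            rw [hstep]
            obtain ⟨g1, g2⟩ := ih hno' (c1 - 1) c2 (t + x) (by omega)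
            rw [g1, g2]
            refine ⟨?_, ?_⟩ <;> dsimp only <;> omega

-- decomposition of the token list around the last barrier
theorem pvDropWhile_head (p : PvTok → Bool) (l : List PvTok) :
    l.dropWhile p = [] ∨ ∃ h t', l.dropWhile p = h :: t' ∧ p h = false := by
  induction l with
  | nil => exact Or.inl rfl
  | cons a l ih =>
      by_cases hp : p a
      · rw [List.dropWhile_cons_of_pos hp]; exact ih
      · rw [List.dropWhile_cons_of_neg hp]
        exact Or.inr ⟨a, l, rfl, by simpa using hp⟩

theorem pvCounters_closed (x y : Int) (τs : List PvTok) :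
    ((τs.foldl (pvTStepA x y) (0, 0, 0)).1
        = ((pvSegT τs).foldl pvExcStep (0, 0)).2 - ((pvSegT τs).foldl pvExcStep (0, 0)).1) ∧
    ((τs.foldl (pvTStepA x y) (0, 0, 0)).2.1 = ((pvSegT τs).foldl pvExcStep (0, 0)).2) := by
  set p : PvTok → Bool := fun τ => τ ≠ PvTok.tO with hp
  have hdecomp : τs = (τs.reverse.dropWhile p).reverse ++ pvSegT τs := by
    have : (( τs.reverse.dropWhile p).reverse ++ pvSegT τs).reverse = τs.reverse := by
      unfold pvSegT
      rw [List.reverse_append, List.reverse_reverse, List.reverse_reverse]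
      exact List.takeWhile_append_dropWhile
    have h2 := congrArg List.reverse this
    rw [List.reverse_reverse, List.reverse_reverse] at h2
    exact h2.symm
  have hno : PvTok.tO ∉ pvSegT τs := by
    intro hmem
    unfold pvSegT at hmem
    rw [List.mem_reverse] at hmem
    have := List.mem_takeWhile_imp hmem
    simp at this
  have hmid : ((τs.reverse.dropWhile p).reverse.foldl (pvTStepA x y) ((0 : Int), (0 : Int), (0 : Int))).1 = 0 ∧
      ((τs.reverse.dropWhile p).reverse.foldl (pvTStepA x y) ((0 : Int), (0 : Int), (0 : Int))).2.1 = 0 := by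
    rcases pvDropWhile_head p τs.reverse with h | ⟨h0, t', hdt, hph⟩
    · rw [h]; simp
    · have h0o : h0 = PvTok.tO := by
        cases h0 <;> simp [hp] at hph ⊢
      rw [hdt, h0o, List.reverse_cons, List.foldl_append]
      simp [pvTStepA]
  set mid := (τs.reverse.dropWhile p).reverse.foldl (pvTStepA x y) ((0 : Int), (0 : Int), (0 : Int)) with hmiddef
  have hmid3 : mid = (0, 0, mid.2.2) := by
    obtain ⟨ha, hb⟩ := hmid
    exact Prod.ext ha (Prod.ext hb rfl)
  have hfold : τs.foldl (pvTStepA x y) ((0 : Int), (0 : Int), (0 : Int))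
      = (pvSegT τs).foldl (pvTStepA x y) ((0 : Int), (0 : Int), mid.2.2) := by
    conv_lhs => rw [hdecomp]
    rw [List.foldl_append, ← hmiddef]
    conv_lhs => rw [hmid3]
  obtain ⟨g1, g2⟩ := pvCnt_seg x y (pvSegT τs) hno 0 0 mid.2.2 le_rfl
  rw [hfold, g1, g2]
  have := pvExc_mx_nonneg (pvSegT τs)
  constructor <;> omega

-- D_ restated through the proof-side names
theorem pvD_iff (s a b : String) (x y : Int) :
    D_process_opt s a b x y ↔
      ((a = "c" ∧ y * min (pvC1 s a b) (pvC2 s a b) ≠ 0) ∨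
       (a ≠ "c" ∧ b = "c" ∧ (if 0 < pvC1 s a b then x else 0) ≠ y * min (pvC1 s a b) (pvC2 s a b))) := by
  unfold D_process_opt pvC1 pvC2 pvW pvT
  by_cases ha : a = "c" <;> simp [ha]

-- a foldl congruence on members
theorem pvFoldl_congr {α β : Type} (l : List α) (f g : β → α → β)
    (h : ∀ c ∈ l, ∀ p, f p c = g p c) : ∀ (init : β), l.foldl f init = l.foldl g init := by
  induction l with
  | nil => intro init; rfl
  | cons c l ih =>
      intro init
      rw [List.foldl_cons, List.foldl_cons, h c (List.mem_cons_self),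
        ih (fun d hd p => h d (List.mem_cons_of_mem c hd) p)]

-- character-vs-string comparison, in the two spellings used by the ports and by D_
theorem pvCeq_iff (c : Char) (t : String) : String.ofList [c] = t ↔ [c] = t.toList := by
  constructor
  · intro h; rw [← h]; simp
  · intro h; have := congrArg String.ofList h; simpa using this

-- the token list of the final segment is the mapped reverse of pvT
theorem pvSegT_map (s a b : String) :
    pvSegT (s.toList.map (pvTok a b)) = ((pvT s a b).reverse).map (pvTok a b) := by
  unfold pvSegT pvT
  rw [← List.map_reverse, List.takeWhile_map]
  have hpred : ((fun τ => decide (τ ≠ PvTok.tO)) ∘ pvTok a b)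
      = fun c => [c] == a.toList || [c] == b.toList := by
    funext c
    simp only [Function.comp_apply]
    unfold pvTok
    split_ifs with hA hB
    · simp [(pvCeq_iff c a).mp hA]
    · simp [(pvCeq_iff c b).mp hB]
    · have h1 : ¬ ([c] = a.toList) := fun h => hA ((pvCeq_iff c a).mpr h)
      have h2 : ¬ ([c] = b.toList) := fun h => hB ((pvCeq_iff c b).mpr h)
      simp [h1, h2]
  rw [hpred, List.map_reverse]

-- members of pvT are pattern letters, so the token step agrees with the char step
theorem pvT_mem (s a b : String) (c : Char) (hc : c ∈ pvT s a b) :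
    [c] = a.toList ∨ [c] = b.toList := by
  unfold pvT at hc
  have := List.mem_takeWhile_imp hc
  simpa using this

theorem pvTok_eq_tb_iff (a b : String) (c : Char) (hc : [c] = a.toList ∨ [c] = b.toList) :
    (pvTok a b c = PvTok.tb) ↔ ¬ ([c] = a.toList) := by
  unfold pvTok
  split_ifs with hA hB
  · simp [(pvCeq_iff c a).mp hA]
  · have h1 : ¬ ([c] = a.toList) := fun h => hA ((pvCeq_iff c a).mpr h)
    simp [h1]
  · have h1 : ¬ ([c] = a.toList) := fun h => hA ((pvCeq_iff c a).mpr h)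
    have h2 : ¬ ([c] = b.toList) := fun h => hB ((pvCeq_iff c b).mpr h)
    rcases hc with h | h
    · exact absurd h h1
    · exact absurd h h2

-- the token-level statistics equal the pair D_ computes over characters
theorem pvW_closed (s a b : String) :
    (pvSegT (s.toList.map (pvTok a b))).foldl pvExcStep (0, 0) = pvW s a b := by
  rw [pvSegT_map, List.foldl_map]
  unfold pvW
  rw [← List.foldl_reverse]
  apply pvFoldl_congr
  intro c hc p
  rw [List.mem_reverse] at hc
  have h := pvT_mem s a b c hc
  by_cases hA : [c] = a.toList
  · have ht : ¬ (pvTok a b c = PvTok.tb) := by rw [pvTok_eq_tb_iff a b c h]; simp [hA]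
    simp [pvExcStep, ht, hA]
    constructor <;> omega
  · have ht : pvTok a b c = PvTok.tb := by rw [pvTok_eq_tb_iff a b c h]; exact hA
    simp [pvExcStep, ht, hA]

-- main assembly ------------------------------------------------------------

theorem pvToList_sc (s : String) : (s ++ "c").toList = s.toList ++ ['c'] := by
  rw [String.toList_append]
  have hc : ("c" : String).toList = ['c'] := by decide
  rw [hc]

theorem pvB_value (s a b : String) (x y : Int) (n1 n2 : Nat) (u : List PvTok)
    (hq : (s.toList.foldl (pvPass1 a b x) ([], 0)).1
        = List.replicate n1 PvTok.ta ++ (List.replicate n2 PvTok.tb ++ u))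
    (hu : u = [] ∨ u.head? = some PvTok.tO) :
    process_opt_alt s a b x y
      = (s.toList.foldl (pvPass1 a b x) ([], 0)).2 + pvGscore y u + y * min (n1 : Int) (n2 : Int) := by
  show ((s.toList.foldl (pvPass1 a b x) ([], 0)).1.reverse.foldl (pvPass2 y)
      ([], (s.toList.foldl (pvPass1 a b x) ([], 0)).2)).2 = _
  set q := s.toList.foldl (pvPass1 a b x) ([], 0) with hqdef
  obtain ⟨_, hsh⟩ := pvPass2_shift y q.1.reverse [] q.2
  rw [hsh]
  have hrev : q.1.reverse = u.reverse ++ (List.replicate n2 PvTok.tb ++ List.replicate n1 PvTok.ta) := by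
    rw [hq]; simp [List.reverse_append, List.reverse_replicate, List.append_assoc]
  rw [hrev, pvPass2_full y u n1 n2 0 hu]
  unfold pvGscore
  ring

-- both ports' values from one run of the machinery: B is base + y*min(k1,k2); A depends on
-- what the sentinel character 'c' is classified as
theorem pvMain (s a b : String) (x y : Int) :
    ∃ (base : Int) (n1 n2 : Nat),
      (n1 : Int) = pvC1 s a b ∧ (n2 : Int) = pvC2 s a b ∧
      process_opt_alt s a b x y = base + y * min (n1 : Int) (n2 : Int) ∧
      process_opt s a b x y =
        (if String.ofList ['c'] = a then base
         else if String.ofList ['c'] = b then (if (n1 : Int) = 0 then base else base + x)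
         else base + y * min (n1 : Int) (n2 : Int)) := by
  have hinv : pvInv y ((s.toList.map (pvTok a b)).foldl (pvTStepA x y) (0, 0, 0))
      (s.toList.foldl (pvPass1 a b x) ([], 0)) := by
    rw [pvFold1_tok]
    exact pvInv_fold x y (s.toList.map (pvTok a b)) (0, 0, 0) ([], 0)
      ⟨0, 0, [], rfl, rfl, rfl, Or.inl rfl, rfl⟩
  obtain ⟨n1, n2, u, h1, h2, h3, h4, h5⟩ := hinv
  set pA := (s.toList.map (pvTok a b)).foldl (pvTStepA x y) ((0 : Int), (0 : Int), (0 : Int)) with hpA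
  have hB := pvB_value s a b x y n1 n2 u h3 h4
  have hcc := pvCounters_closed x y (s.toList.map (pvTok a b))
  have hW := pvW_closed s a b
  have hc1 : (n1 : Int) = pvC1 s a b := by
    rw [← h1]
    refine hcc.1.trans ?_
    unfold pvC1
    rw [hW]
  have hc2 : (n2 : Int) = pvC2 s a b := by
    rw [← h2]
    refine hcc.2.trans ?_
    unfold pvC2
    rw [hW]
  refine ⟨pA.2.2, n1, n2, hc1, hc2, ?_, ?_⟩
  · rw [hB, h5]
  · show ((s ++ "c").toList.foldl (pvAStep a b x y) ((0 : Int), (0 : Int), (0 : Int))).2.2 = _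
    rw [pvToList_sc, List.foldl_append, pvFoldA_tok, pvFoldA_tok, ← hpA]
    simp only [List.map_cons, List.map_nil, List.foldl_cons, List.foldl_nil]
    cases hτ : pvTok a b 'c' with
    | tO =>
        have hab : ¬ (String.ofList ['c'] = a) ∧ ¬ (String.ofList ['c'] = b) := by
          by_cases hA : String.ofList ['c'] = a
          · exfalso; unfold pvTok at hτ; rw [if_pos hA] at hτ; exact PvTok.noConfusion hτ
          · refine ⟨hA, ?_⟩
            by_cases hBq : String.ofList ['c'] = b
            · exfalso; unfold pvTok at hτ; rw [if_neg hA, if_pos hBq] at hτ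
              exact PvTok.noConfusion hτ
            · exact hBq
        rw [if_neg hab.1, if_neg hab.2]
        have hv : (pvTStepA x y pA PvTok.tO).2.2 = pA.2.2 + y * min pA.1 pA.2.1 := rfl
        rw [hv, h1, h2]
    | ta =>
        have hA : String.ofList ['c'] = a := by
          by_cases hA : String.ofList ['c'] = a
          · exact hA
          · exfalso
            unfold pvTok at hτ
            rw [if_neg hA] at hτ
            by_cases hBq : String.ofList ['c'] = b
            · rw [if_pos hBq] at hτ; exact PvTok.noConfusion hτ
            · rw [if_neg hBq] at hτ; exact PvTok.noConfusion hτ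
        rw [if_pos hA]
        exact rfl
    | tb =>
        have hab : ¬ (String.ofList ['c'] = a) ∧ String.ofList ['c'] = b := by
          by_cases hA : String.ofList ['c'] = a
          · exfalso; unfold pvTok at hτ; rw [if_pos hA] at hτ; exact PvTok.noConfusion hτ
          · refine ⟨hA, ?_⟩
            by_cases hBq : String.ofList ['c'] = b
            · exact hBq
            · exfalso; unfold pvTok at hτ; rw [if_neg hA, if_neg hBq] at hτ
              exact PvTok.noConfusion hτ
        rw [if_neg hab.1, if_pos hab.2]
        by_cases hz : pA.1 = 0
        · have hv : pvTStepA x y pA PvTok.tb = (pA.1, pA.2.1 + 1, pA.2.2) := by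
            simp [pvTStepA, hz]
          have hn1 : (n1 : Int) = 0 := by rw [← h1, hz]
          rw [hv, if_pos hn1]
        · have hv : pvTStepA x y pA PvTok.tb = (pA.1 - 1, pA.2.1, pA.2.2 + x) := by
            simp [pvTStepA, hz]
          have hn1 : ¬ ((n1 : Int) = 0) := by rw [← h1]; exact hz
          rw [hv, if_neg hn1]

theorem process_opt_unchanged (s a b : String) (x y : Int) (hnd : ¬ D_process_opt s a b x y) :
    process_opt s a b x y = process_opt_alt s a b x y := by
  obtain ⟨base, n1, n2, hc1, hc2, hBv, hAv⟩ := pvMain s a b x y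
  rw [pvD_iff] at hnd
  rw [hAv, hBv]
  have hcstr : String.ofList ['c'] = "c" := rfl
  by_cases hA : String.ofList ['c'] = a
  · have ha : a = "c" := by rw [← hA, hcstr]
    rw [if_pos hA]
    have hz : y * min (pvC1 s a b) (pvC2 s a b) = 0 := by
      by_contra hy; exact hnd (Or.inl ⟨ha, hy⟩)
    rw [← hc1, ← hc2] at hz
    rw [hz]
    ring
  · have ha : a ≠ "c" := fun h => hA (by rw [h])
    rw [if_neg hA]
    by_cases hBq : String.ofList ['c'] = b
    · have hb : b = "c" := by rw [← hBq, hcstr]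
      rw [if_pos hBq]
      have hcond : (if 0 < pvC1 s a b then x else 0) = y * min (pvC1 s a b) (pvC2 s a b) := by
        by_contra hy; exact hnd (Or.inr ⟨ha, hb, hy⟩)
      rw [← hc1, ← hc2] at hcond
      by_cases hz : (n1 : Int) = 0
      · rw [if_pos hz]
        have hm : min ((n1 : Int)) ((n2 : Int)) = 0 := by omega
        rw [hm]
        ring
      · rw [if_neg hz]
        have hpos : (0 : Int) < (n1 : Int) := by omega
        rw [if_pos hpos] at hcond
        rw [hcond]
    · rw [if_neg hBq]

theorem process_opt_ne (s a b : String) (x y : Int) (hd : D_process_opt s a b x y) :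
    process_opt s a b x y ≠ process_opt_alt s a b x y := by
  obtain ⟨base, n1, n2, hc1, hc2, hBv, hAv⟩ := pvMain s a b x y
  rw [pvD_iff] at hd
  rw [hAv, hBv]
  have hcstr : String.ofList ['c'] = "c" := rfl
  rcases hd with ⟨ha, hy⟩ | ⟨ha, hb, hy⟩
  · have hA : String.ofList ['c'] = a := by rw [ha]
    rw [if_pos hA]
    rw [← hc1, ← hc2] at hy
    intro heq
    exact hy (by linarith)
  · have hA : ¬ (String.ofList ['c'] = a) := fun h => ha (by rw [← h, hcstr])
    have hBq : String.ofList ['c'] = b := by rw [hb]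
    rw [if_neg hA, if_pos hBq]
    rw [← hc1, ← hc2] at hy
    by_cases hz : (n1 : Int) = 0
    · exfalso
      rw [hz] at hy
      have hm : min (0 : Int) ((n2 : Int)) = 0 := by omega
      apply hy
      rw [hm]
      simp
    · rw [if_neg hz]
      have hpos : (0 : Int) < (n1 : Int) := by omega
      rw [if_pos hpos] at hy
      intro heq
      exact hy (by linarith)

-- ===== VERDICT (by name: the statement is the Claim_ definition above) =====
theorem process_opt_spec : Claim_unchanged_process_opt := by
  intro s a b x y _ hnd
  exact process_opt_unchanged s a b x y hnd

theorem process_opt_changed : Claim_changed_process_opt := by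
  unfold Claim_changed_process_opt; decide

theorem process_opt_tight : Claim_exact_process_opt := by
  intro s a b x y _ hd
  exact process_opt_ne s a b x y hd
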